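-- pv_equiv track=rewrite | github.com/marcsingleton/orthology_inference2023 | analysis/ortho_tree/make_meta_AA/make_meta_AA.py | is_invariant
-- ===== SOURCE A (Python) =====
-- def is_invariant(column):
--     sym0 = None
--     for sym in column:
--         if (sym0 is not None) and (sym not in ['-', 'X', sym0]):
--             return False
--         elif sym not in ['-', 'X']:
--             sym0 = sym
--     return True
-- ===== SOURCE B (Python) =====
-- def is_invariant(column):
--     return len({sym for sym in column if sym not in ('-', 'X')}) <= 1
-- ===== Notes on version B (the rewrite author's own statement) =====
-- stated objective: simpler
-- what changed: Replaces the sentinel-carrying short-circuit loop by a two-phase build-then-test: collect the set of distinct non-gap symbols with one set comprehension, then return whether its cardinality is at most one.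
import Mathlib
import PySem

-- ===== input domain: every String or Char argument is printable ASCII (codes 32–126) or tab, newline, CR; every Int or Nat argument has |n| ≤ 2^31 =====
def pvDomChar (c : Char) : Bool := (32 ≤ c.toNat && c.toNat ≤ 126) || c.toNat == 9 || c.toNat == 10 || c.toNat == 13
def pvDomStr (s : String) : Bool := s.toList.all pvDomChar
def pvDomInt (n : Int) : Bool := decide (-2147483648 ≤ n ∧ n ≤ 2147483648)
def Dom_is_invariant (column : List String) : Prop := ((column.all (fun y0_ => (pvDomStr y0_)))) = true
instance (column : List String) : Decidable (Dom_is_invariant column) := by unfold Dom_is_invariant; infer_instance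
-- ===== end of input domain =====

-- B replaces A's sentinel short-circuit loop by building the set of distinct non-gap
-- symbols and testing its cardinality (objective: simpler). Equivalence on the return value.

-- ===== PORT A =====
-- A's loop: state is sym0 (None until the first non-gap symbol is seen).
def isInvLoopA : List String → Option String → Bool
  | [], _ => true
  | sym :: rest, sym0 =>
    if sym0.isSome && !(sym == "-" || sym == "X" || some sym == sym0) then
      false
    else if !(sym == "-" || sym == "X") then
      isInvLoopA rest (some sym)
    else
      isInvLoopA rest sym0

def is_invariant (column : List String) : Bool := isInvLoopA column none

-- ===== PORT B =====
def is_invariant_alt (column : List String) : Bool :=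
  PySem.Set.len (PySem.Set.ofList (column.filter (fun sym => !(sym == "-" || sym == "X")))) ≤ 1

-- ===== PRECONDITION & SPEC =====
def Spec_is_invariant (column : List String) (out : Bool) : Prop := out = is_invariant_alt column
instance (column : List String) (out : Bool) : Decidable (Spec_is_invariant column out) := by unfold Spec_is_invariant; infer_instance

-- ===== CLAIM (what is proved, stated in full; the proofs are below) =====
def Claim_equal_is_invariant : Prop := ∀ (column : List String), Dom_is_invariant column → Spec_is_invariant column (is_invariant column)

-- ===== LEMMAS AND PROOFS =====

-- Once sym0 is fixed, A's loop accepts iff every remaining symbol is a gap or equals sym0.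
lemma isInvLoopA_some (l : List String) (s0 : String) :
    isInvLoopA l (some s0) = l.all (fun s => s == "-" || s == "X" || s == s0) := by
  induction l with
  | nil => rfl
  | cons s rest ih =>
    by_cases hg : s = "-" ∨ s = "X"
    · rcases hg with h | h <;> subst h <;> simp [isInvLoopA, ih]
    · rw [not_or] at hg
      by_cases he : s = s0
      · subst he; simp [isInvLoopA, hg.1, hg.2, ih]
      · simp [isInvLoopA, hg.1, hg.2, he]

-- Folding Set.add never shrinks the accumulator.
lemma le_length_foldl_add (l : List String) (acc : PySem.Set String) :
    acc.length ≤ (l.foldl PySem.Set.add acc).length := by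
  induction l generalizing acc with
  | nil => simp
  | cons x rest ih =>
    refine le_trans ?_ (ih (PySem.Set.add acc x))
    simp only [PySem.Set.add]
    split <;> simp

-- The set built from a real symbol s followed by t stays a singleton iff all of t equals s.
lemma foldl_add_singleton (t : List String) (s : String) :
    decide (((t.foldl PySem.Set.add [s]).length : Int) ≤ 1) = t.all (fun x => x == s) := by
  induction t with
  | nil => simp
  | cons x rest ih =>
    by_cases hx : x = s
    · subst hx
      have h1 : PySem.Set.add [x] x = [x] := by simp [PySem.Set.add, PySem.Set.contains]
      simp only [List.foldl_cons, h1, List.all_cons, beq_self_eq_true, Bool.true_and]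
      exact ih
    · have hadd : PySem.Set.add [s] x = [s, x] := by
        simp [PySem.Set.add, PySem.Set.contains, hx]
      have h2 : 2 ≤ (rest.foldl PySem.Set.add [s, x]).length :=
        le_length_foldl_add rest [s, x]
      have h3 : ¬ (((rest.foldl PySem.Set.add [s, x]).length : Int) ≤ 1) := by
        exact_mod_cast by omega
      simp [List.foldl_cons, hx, h3]

-- Main equivalence, by induction on the column in the initial (sym0 = None) state.
lemma is_invariant_eq_alt (column : List String) :
    is_invariant column = is_invariant_alt column := by
  induction column with
  | nil => rfl
  | cons s rest ih =>
    by_cases hg : s = "-" ∨ s = "X"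
    · have hA : is_invariant (s :: rest) = is_invariant rest := by
        rcases hg with h | h <;> subst h <;> simp [is_invariant, isInvLoopA]
      have hB : is_invariant_alt (s :: rest) = is_invariant_alt rest := by
        rcases hg with h | h <;> subst h <;> simp [is_invariant_alt]
      rw [hA, hB, ih]
    · rw [not_or] at hg
      have hA : is_invariant (s :: rest) = isInvLoopA rest (some s) := by
        simp [is_invariant, isInvLoopA, hg.1, hg.2]
      have hfil : (s :: rest).filter (fun sym => !(sym == "-" || sym == "X")) =
          s :: rest.filter (fun sym => !(sym == "-" || sym == "X")) := by
        simp [hg.1, hg.2]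
      rw [hA, isInvLoopA_some]
      have hadd : PySem.Set.add PySem.Set.empty s = [s] := by
        simp [PySem.Set.add, PySem.Set.empty, PySem.Set.contains]
      simp only [is_invariant_alt, hfil, PySem.Set.len, PySem.Set.ofList, List.foldl_cons, hadd,
        foldl_add_singleton, List.all_filter]
      simp [Bool.not_not, Bool.or_assoc]

-- ===== VERDICT (by name: the statement is the Claim_ definition above) =====
theorem is_invariant_spec : Claim_equal_is_invariant := by
  intro column _
  exact is_invariant_eq_alt column
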